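-- pv_equiv track=rewrite | github.com/TichonetProjects/DL5YA_24 | DL5YA_24/Ex9_20606.py | max_drop
-- ===== SOURCE A (Python) =====
-- def go_up(lst, i):
--     while i<len(lst)-1 and lst[i] < lst[i+1]: i+=1
--     return i
--
-- def go_down(lst, i):
--     while i<len(lst)-1 and lst[i] > lst[i+1]: i+=1
--     return i
--
-- def max_drop(lst):
--     i, j, hi_index, max_drop = 0, 0, 0, 0
--     while j <len(lst)-1:
--         i = go_up(lst, j+1)
--         j = go_down(lst, i+1)
--         max_drop = max(max_drop, lst[i] - lst[j], lst[hi_index] - lst[j])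
--         if lst[i]>lst[hi_index]: hi_index = i
--     return max_drop
-- ===== SOURCE B (Python) =====
-- def max_drop(lst):
--     if len(lst) <= 1:
--         return 0
--     ans = 0
--     run = lst[0]
--     down = False
--     for x, y in zip(lst[1:], lst[2:]):
--         run = max(run, x)
--         if down:
--             if x <= y:
--                 ans = max(ans, run - x)
--                 down = False
--         else:
--             if x >= y:
--                 down = True
--     if down:
--         ans = max(ans, run - lst[-1])
--     return ans
-- ===== Notes on version B (the rewrite author's own statement) =====
-- stated objective: simpler
-- what changed: B replaces A's nested go_up/go_down while-loop helpers and hi_index bookkeeping by a single linear pass over zip(lst[1:], lst[2:]) that keeps a running maximum and an up/down flag, recording a drop at each valley the walk visits.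
-- crash fix: A raises IndexError (lst[j] with j == len(lst)) whenever its go_up climb reaches the last index — on every 2-element list and whenever its peak/valley walk ends ascending; B returns the best drop recorded so far (0 if none). — e.g. on max_drop([0, 1]): A raises IndexError, B returns 0
import Mathlib
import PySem

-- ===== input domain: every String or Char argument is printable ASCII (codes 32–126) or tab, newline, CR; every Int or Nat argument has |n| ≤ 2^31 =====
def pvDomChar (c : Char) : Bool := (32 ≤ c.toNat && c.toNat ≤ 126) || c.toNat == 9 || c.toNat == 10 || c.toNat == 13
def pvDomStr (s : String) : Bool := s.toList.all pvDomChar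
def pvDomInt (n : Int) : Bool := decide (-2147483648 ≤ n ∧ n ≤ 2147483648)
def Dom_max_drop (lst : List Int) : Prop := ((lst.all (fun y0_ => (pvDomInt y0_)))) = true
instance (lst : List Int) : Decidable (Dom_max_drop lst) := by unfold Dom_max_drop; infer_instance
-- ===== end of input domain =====

-- B replaces A's nested go_up/go_down index navigation by one linear pass over the
-- adjacent pairs of lst[1:], keeping a running maximum and an up/down flag (objective: simpler).

-- ===== PORT A =====
-- while i<len(lst)-1 and lst[i] < lst[i+1]: i+=1
def goUp (lst : List Int) (i : Nat) : Nat :=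
  if _h : i < lst.length - 1 ∧ lst.getD i 0 < lst.getD (i+1) 0 then goUp lst (i+1) else i
termination_by lst.length - i
decreasing_by omega

-- while i<len(lst)-1 and lst[i] > lst[i+1]: i+=1
def goDown (lst : List Int) (i : Nat) : Nat :=
  if _h : i < lst.length - 1 ∧ lst.getD (i+1) 0 < lst.getD i 0 then goDown lst (i+1) else i
termination_by lst.length - i
decreasing_by omega

-- these two bounds are cited by loopA's decreasing_by, so they live above it
theorem goUp_ge (lst : List Int) (i : Nat) : i ≤ goUp lst i := by
  fun_induction goUp lst i with
  | case1 i h ih => omega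
  | case2 i h => omega

theorem goDown_ge (lst : List Int) (i : Nat) : i ≤ goDown lst i := by
  fun_induction goDown lst i with
  | case1 i h ih => omega
  | case2 i h => omega

-- the main while loop of max_drop; `none` = the IndexError at lst[j] when j = len(lst)
def loopA (lst : List Int) (j hi : Nat) (md : Int) : Option Int :=
  if _h : j < lst.length - 1 then
    let i := goUp lst (j+1)
    let v := goDown lst (i+1)
    match PySem.List.pyGet? lst (v : Int) with
    | none => none
    | some xv =>
      loopA lst v (if lst.getD hi 0 < lst.getD i 0 then i else hi)
        (max (max md (lst.getD i 0 - xv)) (lst.getD hi 0 - xv))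
  else some md
termination_by lst.length - j
decreasing_by
  have h1 := goUp_ge lst (j+1)
  have h2 := goDown_ge lst (goUp lst (j+1) + 1)
  omega

def max_drop (lst : List Int) : Int := (loopA lst 0 0 0).getD 0

-- ===== PORT B =====
-- the `for x, y in zip(lst[1:], lst[2:])` loop of Source B: `down` = inside a strict
-- descent, `run` = running maximum, `ans` = best drop recorded so far
def scanB : List (Int × Int) → Bool → Int → Int → Bool × Int × Int
  | [], down, run, ans => (down, run, ans)
  | (x, y) :: ps, true, run, ans =>   -- `if down:` branch of the loop body
    let run' := max run x
    if x ≤ y then scanB ps false run' (max ans (run' - x))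
    else scanB ps true run' ans
  | (x, y) :: ps, false, run, ans =>  -- `else:` branch of the loop body
    let run' := max run x
    if y ≤ x then scanB ps true run' ans
    else scanB ps false run' ans

-- the trailing `if down: ans = max(ans, run - lst[-1])` of Source B
def finB (lst : List Int) : Bool × Int × Int → Int
  | (true, run, ans) => max ans (run - lst.getD (lst.length - 1) 0)
  | (false, _, ans) => ans

def max_drop_alt (lst : List Int) : Int :=
  if lst.length ≤ 1 then 0
  else finB lst (scanB ((lst.drop 1).zip (lst.drop 2)) false (lst.getD 0 0) 0)

-- ===== PRECONDITION & SPEC =====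
-- A raises IndexError exactly when its go_up climb reaches the last index.  On the
-- adjacent pairs of lst[1:] that is this two-state pattern check (`down` = inside a
-- strict descent): A crashes iff the pattern ends while not descending.
def crashes : List (Int × Int) → Bool → Bool
  | [], down => !down
  | (x, y) :: ps, false => if x < y then crashes ps false else crashes ps true
  | (x, y) :: ps, true => if y < x then crashes ps true else crashes ps false

-- Pre_ excludes exactly the inputs on which A raises IndexError (every list of
-- length 2, and any longer list whose peak/valley walk ends ascending); A returns
-- a value on all admitted inputs.
def Pre_max_drop (lst : List Int) : Prop :=
  lst.length ≤ 1 ∨ crashes ((lst.drop 1).zip (lst.drop 2)) false = false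
instance (lst : List Int) : Decidable (Pre_max_drop lst) := by
  unfold Pre_max_drop; infer_instance

def pvWitness_max_drop : List Int := [2, 1, 0]

-- A raises IndexError (lst[j] with j = len(lst)) whenever its climb reaches the last
-- index (e.g. on every 2-element list and whenever the walk ends ascending); B
-- returns the best drop recorded so far (0 if none).
def Raises_max_drop (lst : List Int) : Prop :=
  2 ≤ lst.length ∧ crashes ((lst.drop 1).zip (lst.drop 2)) false = true
instance (lst : List Int) : Decidable (Raises_max_drop lst) := by
  unfold Raises_max_drop; infer_instance

def pvRaiseWitness_max_drop : List Int := [0, 1]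
def pvRaiseWitnessOut_max_drop : Int := 0

def Spec_max_drop (lst : List Int) (out : Int) : Prop := out = max_drop_alt lst
instance (lst : List Int) (out : Int) : Decidable (Spec_max_drop lst out) := by
  unfold Spec_max_drop; infer_instance

-- ===== CLAIM (what is proved, stated in full; the proofs are below) =====
def Claim_equal_max_drop : Prop :=
  ∀ (lst : List Int), Dom_max_drop lst → Pre_max_drop lst → Spec_max_drop lst (max_drop lst)

def Claim_raises_max_drop : Prop :=
  (∀ (lst : List Int), Dom_max_drop lst → Raises_max_drop lst → ¬ Pre_max_drop lst) ∧
  (Dom_max_drop (pvRaiseWitness_max_drop) ∧ Raises_max_drop (pvRaiseWitness_max_drop) ∧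
   max_drop_alt (pvRaiseWitness_max_drop) = pvRaiseWitnessOut_max_drop)

-- ===== LEMMAS AND PROOFS =====

-- the suffix pair list the scan still has to process when it stands at index s
def pairsFrom (lst : List Int) (s : Nat) : List (Int × Int) :=
  (lst.drop s).zip (lst.drop (s+1))

theorem pairsFrom_nil (lst : List Int) (s : Nat) (h : lst.length ≤ s + 1) :
    pairsFrom lst s = [] := by
  unfold pairsFrom
  rw [List.drop_eq_nil_of_le h, List.zip_nil_right]

theorem pairsFrom_cons (lst : List Int) (s : Nat) (h : s + 1 < lst.length) :
    pairsFrom lst s =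
      (lst.getD s 0, lst.getD (s+1) 0) :: pairsFrom lst (s+1) := by
  unfold pairsFrom
  rw [List.drop_eq_getElem_cons (by omega : s < lst.length),
      List.drop_eq_getElem_cons (h : s + 1 < lst.length), List.zip_cons_cons,
      List.getD_eq_getElem lst 0 (by omega : s < lst.length),
      List.getD_eq_getElem lst 0 h]

theorem maxAbsorb (r a x : Int) (h : a ≤ x) : max (max r a) x = max r x := by
  simp [max_def]; split_ifs <;> omega

theorem goUp_le (lst : List Int) (s : Nat) (h : s ≤ lst.length - 1) :
    goUp lst s ≤ lst.length - 1 := by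
  fun_induction goUp lst s with
  | case1 i h' ih => exact ih (by omega)
  | case2 i h' => omega

theorem goDown_le (lst : List Int) (s : Nat) (h : s ≤ lst.length - 1) :
    goDown lst s ≤ lst.length - 1 := by
  fun_induction goDown lst s with
  | case1 i h' ih => exact ih (by omega)
  | case2 i h' => omega

theorem goUp_getD_le (lst : List Int) (s : Nat) :
    lst.getD s 0 ≤ lst.getD (goUp lst s) 0 := by
  fun_induction goUp lst s with
  | case1 i h ih => exact le_trans (le_of_lt h.2) ih
  | case2 i h => exact le_refl _

theorem goUp_stop (lst : List Int) (s : Nat) (h : goUp lst s < lst.length - 1) :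
    lst.getD (goUp lst s + 1) 0 ≤ lst.getD (goUp lst s) 0 := by
  fun_induction goUp lst s with
  | case1 i h' ih => exact ih h
  | case2 i h' =>
    by_cases hi : i < lst.length - 1
    · have : ¬ lst.getD i 0 < lst.getD (i+1) 0 := fun hc => h' ⟨hi, hc⟩
      omega
    · omega

theorem goDown_stop (lst : List Int) (s : Nat) (h : goDown lst s < lst.length - 1) :
    lst.getD (goDown lst s) 0 ≤ lst.getD (goDown lst s + 1) 0 := by
  fun_induction goDown lst s with
  | case1 i h' ih => exact ih h
  | case2 i h' =>
    by_cases hi : i < lst.length - 1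
    · have : ¬ lst.getD (i+1) 0 < lst.getD i 0 := fun hc => h' ⟨hi, hc⟩
      omega
    · omega

theorem crashes_goUp (lst : List Int) (s : Nat) :
    crashes (pairsFrom lst s) false = crashes (pairsFrom lst (goUp lst s)) false := by
  fun_induction goUp lst s with
  | case1 i h ih =>
    rw [pairsFrom_cons lst i (by omega), crashes, if_pos h.2]
    exact ih
  | case2 i h => rfl

theorem crashes_goDown (lst : List Int) (s : Nat) :
    crashes (pairsFrom lst s) true = crashes (pairsFrom lst (goDown lst s)) true := by
  fun_induction goDown lst s with
  | case1 i h ih =>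
    rw [pairsFrom_cons lst i (by omega), crashes, if_pos h.2]
    exact ih
  | case2 i h => rfl

theorem scan_goUp (lst : List Int) (s : Nat) :
    ∀ run ans : Int, goUp lst s < lst.length - 1 →
      scanB (pairsFrom lst s) false run ans =
        scanB (pairsFrom lst (goUp lst s + 1)) true
          (max run (lst.getD (goUp lst s) 0)) ans := by
  fun_induction goUp lst s with
  | case1 i h ih =>
    intro run ans hlt
    rw [pairsFrom_cons lst i (by omega), scanB,
        if_neg (by omega : ¬ lst.getD (i+1) 0 ≤ lst.getD i 0)]
    rw [ih (max run (lst.getD i 0)) ans hlt]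
    congr 1
    exact maxAbsorb run (lst.getD i 0)
      (lst.getD (goUp lst (i+1)) 0)
      (le_trans (le_of_lt h.2) (goUp_getD_le lst (i+1)))
  | case2 i h =>
    intro run ans hlt
    have hnl : ¬ lst.getD i 0 < lst.getD (i+1) 0 := fun hc => h ⟨hlt, hc⟩
    rw [pairsFrom_cons lst i (by omega), scanB,
        if_pos (by omega : lst.getD (i+1) 0 ≤ lst.getD i 0)]

theorem scan_goDown (lst : List Int) (s : Nat) :
    ∀ run ans : Int, s ≤ lst.length - 1 → lst.getD s 0 ≤ run →
      scanB (pairsFrom lst s) true run ans =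
        if goDown lst s < lst.length - 1 then
          scanB (pairsFrom lst (goDown lst s + 1)) false run
            (max ans (run - lst.getD (goDown lst s) 0))
        else (true, run, ans) := by
  fun_induction goDown lst s with
  | case1 i h ih =>
    intro run ans hs hr
    rw [pairsFrom_cons lst i (by omega), scanB,
        if_neg (by omega : ¬ lst.getD i 0 ≤ lst.getD (i+1) 0), max_eq_left hr]
    exact ih run ans (by omega) (by omega)
  | case2 i h =>
    intro run ans hs hr
    by_cases hi : i < lst.length - 1
    · have hle : lst.getD i 0 ≤ lst.getD (i+1) 0 := by
        have : ¬ lst.getD (i+1) 0 < lst.getD i 0 := fun hc => h ⟨hi, hc⟩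
        omega
      rw [pairsFrom_cons lst i (by omega), scanB, if_pos hle, if_pos hi, max_eq_left hr]
    · have : i = lst.length - 1 := by omega
      rw [if_neg hi, pairsFrom_nil lst i (by omega), scanB]

theorem pyGet_some (lst : List Int) (v : Nat) (h : v < lst.length) :
    PySem.List.pyGet? lst (v : Int) = some (lst.getD v 0) := by
  simp [PySem.List.pyGet?_natCast, List.getD_eq_getElem?_getD, List.getElem?_eq_getElem h]

theorem mdEq (md a b x : Int) : max (max md (a - x)) (b - x) = max md (max b a - x) := by
  simp [max_def]; split_ifs <;> omega

theorem mainLem (lst : List Int) : ∀ fuel j hi : Nat, ∀ md : Int,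
    lst.length - j ≤ fuel →
    crashes (pairsFrom lst (j+1)) false = false →
    loopA lst j hi md = some (finB lst (scanB (pairsFrom lst (j+1)) false (lst.getD hi 0) md)) := by
  intro fuel
  induction fuel with
  | zero =>
    intro j hi md hf hcr
    exfalso
    rw [pairsFrom_nil lst (j+1) (by omega)] at hcr
    simp [crashes] at hcr
  | succ fuel ih =>
    intro j hi md hf hcr
    by_cases hj : j < lst.length - 1
    case neg =>
      exfalso
      rw [pairsFrom_nil lst (j+1) (by omega)] at hcr
      simp [crashes] at hcr
    case pos =>
      set i := goUp lst (j+1) with hidef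
      set v := goDown lst (i+1) with hvdef
      have hile : i ≤ lst.length - 1 := goUp_le lst (j+1) (by omega)
      have hige : j + 1 ≤ i := goUp_ge lst (j+1)
      -- the crash analysis: i must stop strictly before the last index
      have hcrU : crashes (pairsFrom lst i) false = false := by
        rw [← crashes_goUp]; exact hcr
      have hilt : i < lst.length - 1 := by
        by_contra hc
        rw [pairsFrom_nil lst i (by omega)] at hcrU
        simp [crashes] at hcrU
      have hstop : lst.getD (i+1) 0 ≤ lst.getD i 0 := goUp_stop lst (j+1) hilt
      have hcrD : crashes (pairsFrom lst v) true = false := by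
        rw [← crashes_goDown]
        rw [pairsFrom_cons lst i (by omega), crashes, if_neg (by omega)] at hcrU
        exact hcrU
      have hvle : v ≤ lst.length - 1 := goDown_le lst (i+1) (by omega)
      have hvge : i + 1 ≤ v := goDown_ge lst (i+1)
      -- unfold one iteration of A's loop
      rw [loopA, dif_pos hj]
      simp only [← hidef, ← hvdef]
      rw [pyGet_some lst v (by omega)]
      show loopA lst v _ _ = _
      -- unfold B's scan across the same ascent and descent
      rw [scan_goUp lst (j+1) (lst.getD hi 0) md hilt, ← hidef]
      rw [scan_goDown lst (i+1) (max (lst.getD hi 0) (lst.getD i 0)) md (by omega)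
            (le_trans hstop (le_max_right _ _)), ← hvdef]
      have hhieq : lst.getD (if lst.getD hi 0 < lst.getD i 0 then i else hi) 0 =
          max (lst.getD hi 0) (lst.getD i 0) := by
        split_ifs with hcmp
        · exact (max_eq_right (le_of_lt hcmp)).symm
        · exact (max_eq_left (by omega)).symm
      by_cases hvlt : v < lst.length - 1
      case pos =>
        rw [if_pos hvlt]
        have hvstop : lst.getD v 0 ≤ lst.getD (v+1) 0 := goDown_stop lst (i+1) hvlt
        have hcrNext : crashes (pairsFrom lst (v+1)) false = false := by
          rw [pairsFrom_cons lst v (by omega), crashes, if_neg (by omega)] at hcrD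
          exact hcrD
        rw [ih v _ _ (by omega) hcrNext, hhieq, mdEq]
      case neg =>
        -- the walk ends in the last index: A's loop stops, B's trailing fix-up fires
        have hveq : v = lst.length - 1 := by omega
        rw [if_neg hvlt, loopA, dif_neg (by omega), finB, ← hveq]
        exact congrArg some (mdEq md (lst.getD i 0) (lst.getD hi 0) (lst.getD v 0))

-- ===== VERDICT (by name: the statement is the Claim_ definition above) =====
theorem max_drop_spec : Claim_equal_max_drop := by
  intro lst _ hpre
  unfold Spec_max_drop max_drop max_drop_alt
  rcases hpre with h | h
  · rw [if_pos h, loopA, dif_neg (by omega)]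
    rfl
  · by_cases hn : lst.length ≤ 1
    · rw [if_pos hn, loopA, dif_neg (by omega)]
      rfl
    · rw [if_neg hn, mainLem lst (lst.length) 0 0 0 (by omega) h]
      rfl

theorem max_drop_raises : Claim_raises_max_drop := by
  unfold Claim_raises_max_drop
  refine ⟨?_, by decide, by decide, by decide⟩
  intro lst _ hr hp
  rcases hp with h | h
  · exact absurd hr.1 (by omega)
  · rw [hr.2] at h; cases h

-- self-check: the raise witness really lies outside Pre_max_drop
theorem pvRaiseWitness_ok : ¬ Pre_max_drop pvRaiseWitness_max_drop :=
  max_drop_raises.1 pvRaiseWitness_max_drop (by decide) max_drop_raises.2.2.1
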